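-- pv_equiv track=rewrite | github.com/JulesSu111/pdf-cutstack-booklet | archive/original_vertical.py | make_64up_order
-- ===== SOURCE A (Python) =====
-- def make_64up_order(n_pages: int):
--     """
--     旧逻辑：保持你现在一直在用的排版顺序。
--
--     每张 A4 纸（两面）用 8 个小页：
--       正面：左上 A(=X-4s)，右上 a(=4s+1)，左下 C(=X-2-4s)，右下 c(=4s+3)
--       背面：左上 b(=4s+2)，右上 B(=X-1-4s)，左下 d(=4s+4)，右下 D(=X-3-4s)
--
--     这和你“例子.pdf”的结构一致：第一页、第三页、X、X-2；背面第二页、第四页、X-1、X-3。:contentReference[oaicite:1]{index=1}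
--     缺点是：从中间撕开后，通常需要手动上下穿插整理。
--     """
--     padded = n_pages if n_pages % 8 == 0 else ((n_pages + 7) // 8) * 8
--     order = []
--     sheets = padded // 8
--
--     for s in range(sheets):
--         a = 4 * s + 1
--         b = a + 1
--         c = a + 2
--         d = a + 3
--
--         A = padded - 4 * s
--         B = A - 1
--         C = A - 2
--         D = A - 3
--
--         # 正面：左上 A，右上 a，左下 C，右下 c
--         order.extend([A, a, C, c])
--
--         # 背面：左上 b，右上 B，左下 d，右下 D
--         order.extend([b, B, d, D])
--
--     order = [p if 1 <= p <= n_pages else None for p in order]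
--     return order
-- ===== SOURCE B (Python) =====
-- def make_64up_order(n_pages: int):
--     # Inverse-permutation scatter: for each page compute the slot it occupies
--     # on the sheets and write it there, instead of generating slots in order.
--     padded = ((n_pages + 7) // 8) * 8
--     half = padded // 2
--     FRONT = (1, 4, 3, 6)  # slot offset within a sheet for a low page, by (p-1) % 4
--     BACK = (0, 5, 2, 7)   # slot offset within a sheet for a high page, by (padded-p) % 4
--     slots = [0] * padded
--     for p in range(1, padded + 1):
--         if p <= half:
--             s, j = divmod(p - 1, 4)
--             slots[8 * s + FRONT[j]] = p
--         else:
--             s, j = divmod(padded - p, 4)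
--             slots[8 * s + BACK[j]] = p
--     return [p if 1 <= p <= n_pages else None for p in slots]
-- ===== Notes on version B (the rewrite author's own statement) =====
-- stated objective: alternative
-- what changed: B computes the inverse permutation: instead of generating the output slots in order from a sheet counter, it iterates over the pages 1..padded, computes for each page the slot it occupies via divmod and a fixed offset table, and scatter-writes it into a preallocated array before the None clamp.
import Mathlib
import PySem

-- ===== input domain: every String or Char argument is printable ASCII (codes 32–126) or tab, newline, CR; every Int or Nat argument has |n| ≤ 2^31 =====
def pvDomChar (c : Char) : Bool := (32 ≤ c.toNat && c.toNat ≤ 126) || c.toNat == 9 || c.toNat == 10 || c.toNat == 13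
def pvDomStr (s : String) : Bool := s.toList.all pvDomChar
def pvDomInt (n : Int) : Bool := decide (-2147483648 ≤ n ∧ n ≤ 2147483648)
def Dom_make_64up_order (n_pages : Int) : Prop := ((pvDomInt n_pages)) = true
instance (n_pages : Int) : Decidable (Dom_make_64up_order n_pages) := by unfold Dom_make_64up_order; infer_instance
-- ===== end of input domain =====

-- B computes the inverse permutation (page -> slot) and scatter-writes each page into a
-- preallocated table, instead of A's generating the slot sequence in order; alternative
-- decomposition, same cost.

-- ===== PORT A =====
def make_64up_order (n_pages : Int) : List (Option Int) :=
  let padded := if PySem.Int.mod n_pages 8 == 0 then n_pages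
                else (PySem.Int.floordiv (n_pages + 7) 8) * 8
  let sheets := PySem.Int.floordiv padded 8
  let order := (PySem.List.pyRange 0 sheets 1).foldl (fun order s =>
    let a := 4 * s + 1
    let b := a + 1
    let c := a + 2
    let d := a + 3
    let A := padded - 4 * s
    let B := A - 1
    let C := A - 2
    let D := A - 3
    (order ++ [A, a, C, c]) ++ [b, B, d, D]) []
  order.map (fun p => if 1 ≤ p ∧ p ≤ n_pages then some p else none)

-- ===== PORT B =====
-- the written List.set index is in range on every reached input (proved below)
def make_64up_order_alt (n_pages : Int) : List (Option Int) :=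
  let padded := (PySem.Int.floordiv (n_pages + 7) 8) * 8
  let half := PySem.Int.floordiv padded 2
  let front : List Int := [1, 4, 3, 6]
  let back : List Int := [0, 5, 2, 7]
  let slots := (PySem.List.pyRange 1 (padded + 1) 1).foldl (fun slots p =>
    if p ≤ half then
      let s := PySem.Int.floordiv (p - 1) 4
      let j := PySem.Int.mod (p - 1) 4
      slots.set (8 * s + front.getD j.toNat 0).toNat p
    else
      let s := PySem.Int.floordiv (padded - p) 4
      let j := PySem.Int.mod (padded - p) 4
      slots.set (8 * s + back.getD j.toNat 0).toNat p) (List.replicate padded.toNat 0)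
  slots.map (fun p => if 1 ≤ p ∧ p ≤ n_pages then some p else none)

-- ===== PRECONDITION & SPEC =====
def Spec_make_64up_order (n_pages : Int) (out : List (Option Int)) : Prop := out = make_64up_order_alt n_pages
instance (n_pages : Int) (out : List (Option Int)) : Decidable (Spec_make_64up_order n_pages out) := by unfold Spec_make_64up_order; infer_instance

-- ===== CLAIM (what is proved, stated in full; the proofs are below) =====
def Claim_equal_make_64up_order : Prop := ∀ (n_pages : Int), Dom_make_64up_order n_pages → Spec_make_64up_order n_pages (make_64up_order n_pages)

-- ===== LEMMAS AND PROOFS =====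

-- A's padding expression always equals the unconditional ceiling formula
theorem pv_pad_eq (n : Int) :
    (if PySem.Int.mod n 8 == 0 then n else (PySem.Int.floordiv (n + 7) 8) * 8)
      = (PySem.Int.floordiv (n + 7) 8) * 8 := by
  rw [PySem.Int.floordiv_eq_ediv_of_pos (by omega), PySem.Int.mod_eq_emod_of_pos (by omega)]
  split_ifs with h
  · simp only [beq_iff_eq] at h; omega
  · rfl

-- pvG P i: the page number slot i carries when the padded count is P;
-- pvIdx P p: the slot index B computes for page p (exactly the port's expression)
def pvG (P : Int) (i : Nat) : Int :=
  let s : Int := (i / 8 : Nat)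
  if i % 8 = 0 then P - 4 * s
  else if i % 8 = 1 then 4 * s + 1
  else if i % 8 = 2 then P - 4 * s - 2
  else if i % 8 = 3 then 4 * s + 3
  else if i % 8 = 4 then 4 * s + 2
  else if i % 8 = 5 then P - 4 * s - 1
  else if i % 8 = 6 then 4 * s + 4
  else P - 4 * s - 3

def pvIdx (P p : Int) : Nat :=
  if p ≤ PySem.Int.floordiv P 2 then
    (8 * PySem.Int.floordiv (p - 1) 4
       + ([1, 4, 3, 6] : List Int).getD (PySem.Int.mod (p - 1) 4).toNat 0).toNat
  else
    (8 * PySem.Int.floordiv (P - p) 4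
       + ([0, 5, 2, 7] : List Int).getD (PySem.Int.mod (P - p) 4).toNat 0).toNat

-- evaluate pvIdx on an explicit low page 4*s + j + 1 (j = (p-1) % 4)
theorem pvIdx_low (P s j : Int) (k : Nat) (hP : P = 8 * k) (_hs0 : 0 ≤ s) (hsk : s < k)
    (hj : j = 0 ∨ j = 1 ∨ j = 2 ∨ j = 3) :
    pvIdx P (4 * s + j + 1)
      = (8 * s + (if j = 0 then 1 else if j = 1 then 4 else if j = 2 then 3 else 6)).toNat := by
  unfold pvIdx
  have hhalf : PySem.Int.floordiv P 2 = 4 * k := by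
    rw [PySem.Int.floordiv_eq_ediv_of_pos (by omega)]; omega
  rw [hhalf, if_pos (by omega)]
  have h1 : 4 * s + j + 1 - 1 = 4 * s + j := by ring
  rw [h1, PySem.Int.floordiv_eq_ediv_of_pos (by omega), PySem.Int.mod_eq_emod_of_pos (by omega)]
  have hd : (4 * s + j) / 4 = s := by omega
  rw [hd]
  rcases hj with rfl | rfl | rfl | rfl <;> norm_num [show Int.toNat 2 = 2 from rfl, show Int.toNat 3 = 3 from rfl]

-- evaluate pvIdx on an explicit high page P - 4*s - j (j = (P-p) % 4)
theorem pvIdx_high (P s j : Int) (k : Nat) (hP : P = 8 * k) (_hs0 : 0 ≤ s) (hsk : s < k)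
    (hj : j = 0 ∨ j = 1 ∨ j = 2 ∨ j = 3) :
    pvIdx P (P - 4 * s - j)
      = (8 * s + (if j = 0 then 0 else if j = 1 then 5 else if j = 2 then 2 else 7)).toNat := by
  unfold pvIdx
  have hhalf : PySem.Int.floordiv P 2 = 4 * k := by
    rw [PySem.Int.floordiv_eq_ediv_of_pos (by omega)]; omega
  rw [hhalf, if_neg (by omega)]
  have h1 : P - (P - 4 * s - j) = 4 * s + j := by ring
  rw [h1, PySem.Int.floordiv_eq_ediv_of_pos (by omega), PySem.Int.mod_eq_emod_of_pos (by omega)]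
  have hd : (4 * s + j) / 4 = s := by omega
  rw [hd]
  rcases hj with rfl | rfl | rfl | rfl <;> norm_num [show Int.toNat 2 = 2 from rfl, show Int.toNat 3 = 3 from rfl]

theorem pvG_at (P : Int) (s r : Nat) (hr : r < 8) :
    pvG P (8 * s + r)
      = (if r = 0 then P - 4 * (s : Int) else if r = 1 then 4 * s + 1
         else if r = 2 then P - 4 * s - 2 else if r = 3 then 4 * s + 3
         else if r = 4 then 4 * s + 2 else if r = 5 then P - 4 * s - 1
         else if r = 6 then 4 * s + 4 else P - 4 * s - 3) := by
  unfold pvG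
  have h1 : (8 * s + r) / 8 = s := by omega
  have h2 : (8 * s + r) % 8 = r := by omega
  simp only [h1, h2]

theorem pv_idx_g (P : Int) (k : Nat) (hP : P = 8 * k) (i : Nat) (hi : i < 8 * k) :
    pvIdx P (pvG P i) = i := by
  obtain ⟨s, r, hr8, rfl⟩ : ∃ s r, r < 8 ∧ i = 8 * s + r := ⟨i / 8, i % 8, by omega, by omega⟩
  have hsk : s < k := by omega
  have hs0 : (0 : Int) ≤ s := by positivity
  have hski : (s : Int) < k := by exact_mod_cast hsk
  rw [pvG_at P s r hr8]
  interval_cases r <;> norm_num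
  · rw [show P - 4 * (s : Int) = P - 4 * s - 0 by ring,
        pvIdx_high P s 0 k hP hs0 hski (by norm_num)]; norm_num; omega
  · rw [show 4 * (s : Int) + 1 = 4 * s + 0 + 1 by ring,
        pvIdx_low P s 0 k hP hs0 hski (by norm_num)]; norm_num; omega
  · rw [pvIdx_high P s 2 k hP hs0 hski (by norm_num)]; norm_num; omega
  · rw [show 4 * (s : Int) + 3 = 4 * s + 2 + 1 by ring,
        pvIdx_low P s 2 k hP hs0 hski (by norm_num)]; norm_num; omega
  · rw [show 4 * (s : Int) + 2 = 4 * s + 1 + 1 by ring,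
        pvIdx_low P s 1 k hP hs0 hski (by norm_num)]; norm_num; omega
  · rw [pvIdx_high P s 1 k hP hs0 hski (by norm_num)]; norm_num; omega
  · rw [show 4 * (s : Int) + 4 = 4 * s + 3 + 1 by ring,
        pvIdx_low P s 3 k hP hs0 hski (by norm_num)]; norm_num; omega
  · rw [pvIdx_high P s 3 k hP hs0 hski (by norm_num)]; norm_num; omega

theorem pv_g_idx (P : Int) (k : Nat) (hP : P = 8 * k) (p : Int) (h1 : 1 ≤ p) (h2 : p ≤ P) :
    pvG P (pvIdx P p) = p ∧ pvIdx P p < 8 * k := by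
  by_cases hlow : p ≤ 4 * (k : Int)
  · obtain ⟨s, j, hs0, hsk, hj, hp⟩ :
        ∃ s j : Int, 0 ≤ s ∧ s < k ∧ (j = 0 ∨ j = 1 ∨ j = 2 ∨ j = 3) ∧ p = 4 * s + j + 1 :=
      ⟨(p - 1) / 4, (p - 1) % 4, by omega, by omega, by omega, by omega⟩
    rw [hp, pvIdx_low P s j k hP hs0 hsk hj]
    obtain ⟨sn, rfl⟩ := Int.eq_ofNat_of_zero_le hs0
    rcases hj with rfl | rfl | rfl | rfl <;> norm_num <;>
      [ rw [show ((8 * sn + 1 : Int)).toNat = 8 * sn + 1 by omega, pvG_at P sn 1 (by norm_num)];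
        rw [show ((8 * sn + 4 : Int)).toNat = 8 * sn + 4 by omega, pvG_at P sn 4 (by norm_num)];
        rw [show ((8 * sn + 3 : Int)).toNat = 8 * sn + 3 by omega, pvG_at P sn 3 (by norm_num)];
        rw [show ((8 * sn + 6 : Int)).toNat = 8 * sn + 6 by omega, pvG_at P sn 6 (by norm_num)] ] <;>
      norm_num <;> omega
  · obtain ⟨s, j, hs0, hsk, hj, hp⟩ :
        ∃ s j : Int, 0 ≤ s ∧ s < k ∧ (j = 0 ∨ j = 1 ∨ j = 2 ∨ j = 3) ∧ p = P - 4 * s - j :=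
      ⟨(P - p) / 4, (P - p) % 4, by omega, by omega, by omega, by omega⟩
    rw [hp, pvIdx_high P s j k hP hs0 hsk hj]
    obtain ⟨sn, rfl⟩ := Int.eq_ofNat_of_zero_le hs0
    rcases hj with rfl | rfl | rfl | rfl <;> norm_num <;>
      [ rw [show ((8 * sn : Int)).toNat = 8 * sn + 0 by omega, pvG_at P sn 0 (by norm_num)];
        rw [show ((8 * sn + 5 : Int)).toNat = 8 * sn + 5 by omega, pvG_at P sn 5 (by norm_num)];
        rw [show ((8 * sn + 2 : Int)).toNat = 8 * sn + 2 by omega, pvG_at P sn 2 (by norm_num)];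
        rw [show ((8 * sn + 7 : Int)).toNat = 8 * sn + 7 by omega, pvG_at P sn 7 (by norm_num)] ] <;>
      norm_num <;> omega

theorem pv_scatter_length (idx : Int → Nat) (L : List Int) (init : List Int) :
    (L.foldl (fun sl p => sl.set (idx p) p) init).length = init.length := by
  induction L generalizing init with
  | nil => rfl
  | cons x L ih => simp only [List.foldl_cons]; rw [ih, List.length_set]

theorem pv_scatter_miss (idx : Int → Nat) (L : List Int) (init : List Int) (i : Nat)
    (h : ∀ p ∈ L, idx p ≠ i) :
    (L.foldl (fun sl p => sl.set (idx p) p) init)[i]? = init[i]? := by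
  induction L generalizing init with
  | nil => rfl
  | cons x L ih =>
    simp only [List.foldl_cons]
    rw [ih _ (fun p hp => h p (List.mem_cons_of_mem _ hp)),
        List.getElem?_set_ne (h x List.mem_cons_self)]

theorem pv_scatter_hit (idx : Int → Nat) (L : List Int)
    (hpw : L.Pairwise (fun a b => idx a ≠ idx b)) :
    ∀ (init : List Int) (i : Nat) (p : Int), p ∈ L → idx p = i → i < init.length →
    (L.foldl (fun sl q => sl.set (idx q) q) init)[i]? = some p := by
  induction L with
  | nil => intro _ _ _ h; cases h
  | cons x L ih =>
    intro init i p hp hip hlen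
    rcases List.pairwise_cons.mp hpw with ⟨hx, hL⟩
    simp only [List.foldl_cons]
    rcases List.mem_cons.mp hp with rfl | hpL
    · rw [pv_scatter_miss idx L (init.set (idx p) p) i
            (fun q hq hqi => hx q hq (hip.trans hqi.symm)), ← hip,
          List.getElem?_set_self (by rw [hip]; exact hlen)]
    · exact ih hL _ _ _ hpL hip (by rwa [List.length_set])

theorem pv_A_flat (P : Int) (k : Nat) :
    (PySem.List.pyRange 0 k 1).flatMap (fun s =>
        [P - 4 * s, 4 * s + 1, P - 4 * s - 2, 4 * s + 1 + 2]
          ++ [4 * s + 1 + 1, P - 4 * s - 1, 4 * s + 1 + 3, P - 4 * s - 3])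
      = (List.range (8 * k)).map (pvG P) := by
  induction k with
  | zero => simp [PySem.List.pyRange_one_eq_nil]
  | succ m ih =>
    have hsplit : PySem.List.pyRange 0 ((m : Int) + 1) 1
        = PySem.List.pyRange 0 m 1 ++ [(m : Int)] := by
      rw [PySem.List.pyRange_one_succ_right (by positivity)]
    have hrange : List.range (8 * (m + 1))
        = List.range (8 * m) ++ (List.range 8).map (8 * m + ·) := by
      rw [show 8 * (m + 1) = 8 * m + 8 by ring, List.range_add]
    push_cast
    rw [hsplit, List.flatMap_append, ih, hrange, List.map_append, List.map_map]
    congr 1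
    rw [show List.range 8 = [0, 1, 2, 3, 4, 5, 6, 7] from rfl]
    simp only [List.map_cons, List.map_nil, List.flatMap_cons, List.flatMap_nil, List.append_nil,
      Function.comp_apply, List.cons_append, List.nil_append]
    rw [pvG_at P m 0 (by norm_num), pvG_at P m 1 (by norm_num), pvG_at P m 2 (by norm_num),
        pvG_at P m 3 (by norm_num), pvG_at P m 4 (by norm_num), pvG_at P m 5 (by norm_num),
        pvG_at P m 6 (by norm_num), pvG_at P m 7 (by norm_num)]
    norm_num
    refine ⟨by ring, by ring, by ring⟩

theorem pv_g_mem (P : Int) (k : Nat) (hP : P = 8 * k) (i : Nat) (hi : i < 8 * k) :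
    1 ≤ pvG P i ∧ pvG P i ≤ P := by
  unfold pvG
  have hs : i / 8 < k := by omega
  have hr : i % 8 < 8 := by omega
  dsimp only
  split_ifs <;> constructor <;> push_cast <;> omega

theorem pv_B_eq (P : Int) (k : Nat) (hP : P = 8 * k) :
    (PySem.List.pyRange 1 (P + 1) 1).foldl (fun sl p => sl.set (pvIdx P p) p)
        (List.replicate (8 * k) 0)
      = (List.range (8 * k)).map (pvG P) := by
  have hpw : (PySem.List.pyRange 1 (P + 1) 1).Pairwise (fun a b => pvIdx P a ≠ pvIdx P b) := by
    refine List.Pairwise.imp_of_mem ?_ (PySem.List.nodup_pyRange_one 1 (P + 1))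
    intro a b ha hb hne heq
    rw [PySem.List.mem_pyRange_one] at ha hb
    exact hne (by
      rw [← (pv_g_idx P k hP a ha.1 (by omega)).1, ← (pv_g_idx P k hP b hb.1 (by omega)).1, heq])
  apply List.ext_getElem?
  intro i
  by_cases hi : i < 8 * k
  · rw [pv_scatter_hit (pvIdx P) _ hpw _ _ (pvG P i)
      (by rw [PySem.List.mem_pyRange_one]
          have := pv_g_mem P k hP i hi; omega)
      (pv_idx_g P k hP i hi) (by simpa using hi)]
    rw [List.getElem?_map, List.getElem?_range hi]; rfl
  · rw [List.getElem?_eq_none_iff.mpr (by rw [pv_scatter_length]; simpa using not_lt.mp hi),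
        List.getElem?_eq_none_iff.mpr (by simpa using not_lt.mp hi)]

-- ===== VERDICT (by name: the statement is the Claim_ definition above) =====
theorem make_64up_order_spec : Claim_equal_make_64up_order := by
  intro n _
  unfold Spec_make_64up_order make_64up_order make_64up_order_alt
  dsimp only
  rw [pv_pad_eq]
  generalize PySem.Int.floordiv (n + 7) 8 = q
  have hsheets : PySem.Int.floordiv (q * 8) 8 = q := by
    rw [PySem.Int.floordiv_eq_ediv_of_pos (by omega)]; omega
  rw [hsheets]
  congr 1
  have hfun : (fun (sl : List Int) (p : Int) =>
      if p ≤ PySem.Int.floordiv (q * 8) 2 then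
        sl.set (8 * PySem.Int.floordiv (p - 1) 4
          + ([1, 4, 3, 6] : List Int).getD (PySem.Int.mod (p - 1) 4).toNat 0).toNat p
      else
        sl.set (8 * PySem.Int.floordiv (q * 8 - p) 4
          + ([0, 5, 2, 7] : List Int).getD (PySem.Int.mod (q * 8 - p) 4).toNat 0).toNat p)
      = fun sl p => sl.set (pvIdx (q * 8) p) p := by
    funext sl p; unfold pvIdx; split_ifs <;> rfl
  rw [hfun]
  by_cases hk : 0 ≤ q
  · obtain ⟨k, rfl⟩ := Int.eq_ofNat_of_zero_le hk
    have hrep : ((k : Int) * 8).toNat = 8 * k := by omega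
    rw [hrep]
    simp only [List.append_assoc]
    rw [PySem.List.foldl_append_eq_flatMap, List.nil_append,
        pv_A_flat ((k : Int) * 8) k, ← pv_B_eq ((k : Int) * 8) k (by ring)]
  · rw [PySem.List.pyRange_one_eq_nil (by omega : q ≤ 0),
        PySem.List.pyRange_one_eq_nil (by omega : q * 8 + 1 ≤ 1)]
    simp [Int.toNat_of_nonpos (show q * 8 ≤ 0 by omega)]
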